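-- pv_equiv track=rewrite | github.com/falconizmi/extended-tasks | 02/r3_delete.py | delete_to_maximal
-- ===== SOURCE A (Python) =====
-- def delete_to_maximal(number):
--     digits = count_digits(number)
--     if digits == 1:
--         return number
--
--     while digits > 1:
--         num1 = (number // (10 ** (digits - 1))) % 10
--         num2 = (number // (10 ** (digits - 2))) % 10
--         if num1 < num2:
--             return (number // (10 ** digits)) * (10 ** (digits-1)) + number % (10 ** (digits - 1))
--         digits -= 1
--
--     return number // 10
--
-- def count_digits(number):
--     if number == 0:
--         return 1
--
--     digits = 0
--     while number != 0:
--         number //= 10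
--         digits += 1
--     return digits
-- ===== SOURCE B (Python) =====
-- def delete_to_maximal(number):
--     # Brute force: try deleting every digit position and keep the maximum.
--     if number < 10:
--         return number
--     best = number // 10  # delete the last digit
--     p = 10
--     while p <= number:   # p == 10**i: delete the digit at position i
--         cand = (number // (p * 10)) * p + number % p
--         if cand > best:
--             best = cand
--         p *= 10
--     return best
-- ===== Notes on version B (the rewrite author's own statement) =====
-- stated objective: alternative
-- what changed: Replaces the greedy scan that returns at the first ascending adjacent digit pair with a brute-force loop that forms every delete-one-digit candidate arithmetically and returns their maximum; Pre_ requires a nonnegative argument because A's count_digits loops forever on negative input.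
import Mathlib
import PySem

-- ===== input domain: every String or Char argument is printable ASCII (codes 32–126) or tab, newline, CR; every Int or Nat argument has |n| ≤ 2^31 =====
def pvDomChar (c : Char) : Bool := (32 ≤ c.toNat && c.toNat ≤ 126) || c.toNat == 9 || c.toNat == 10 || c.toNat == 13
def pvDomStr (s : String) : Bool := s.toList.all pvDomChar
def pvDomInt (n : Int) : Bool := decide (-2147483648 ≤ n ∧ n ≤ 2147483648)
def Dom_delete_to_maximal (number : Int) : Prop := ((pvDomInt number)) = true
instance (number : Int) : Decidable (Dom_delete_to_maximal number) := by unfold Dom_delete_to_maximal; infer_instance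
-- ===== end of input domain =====

-- B replaces A's greedy first-ascent scan by a brute-force maximum over all delete-one-digit
-- candidates (objective: alternative). Pre_ requires 0 ≤ number: A's count_digits loops forever
-- on negative input (-1 // 10 == -1 in Python).

-- ===== PORT A =====
-- count_digits inner while-loop; the `number < 0` branch marks where the Python loop diverges
-- (unreachable under Pre_delete_to_maximal).
def countDigitsGo (number : Int) (digits : Int) : Int :=
  if _h : number = 0 then digits
  else if _h2 : number < 0 then digits
  else countDigitsGo (PySem.Int.floordiv number 10) (digits + 1)
termination_by number.toNat
decreasing_by
  rw [PySem.Int.floordiv_eq_ediv_of_pos (by norm_num)]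
  omega

def count_digits (number : Int) : Int :=
  if number = 0 then 1 else countDigitsGo number 0

-- the `while digits > 1` loop of A
def dtmLoop (number : Int) (digits : Int) : Int :=
  if _h : 1 < digits then
    let num1 := PySem.Int.mod (PySem.Int.floordiv number (10 ^ (digits - 1).toNat)) 10
    let num2 := PySem.Int.mod (PySem.Int.floordiv number (10 ^ (digits - 2).toNat)) 10
    if num1 < num2 then
      (PySem.Int.floordiv number (10 ^ digits.toNat)) * 10 ^ (digits - 1).toNat
        + PySem.Int.mod number (10 ^ (digits - 1).toNat)
    else dtmLoop number (digits - 1)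
  else PySem.Int.floordiv number 10
termination_by digits.toNat
decreasing_by omega

def delete_to_maximal (number : Int) : Int :=
  let digits := count_digits number
  if digits = 1 then number
  else dtmLoop number digits

-- ===== PORT B =====
-- the `while p <= number` loop of B; hp records the loop invariant 0 < p (for termination only)
def altLoop (number : Int) (p : Int) (best : Int) (hp : 0 < p) : Int :=
  if _h : p ≤ number then
    let cand := (PySem.Int.floordiv number (p * 10)) * p + PySem.Int.mod number p
    altLoop number (p * 10) (if best < cand then cand else best) (by omega)
  else best
termination_by (number + 1 - p).toNat
decreasing_by omega

def delete_to_maximal_alt (number : Int) : Int :=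
  if number < 10 then number
  else altLoop number 10 (PySem.Int.floordiv number 10) (by norm_num)

-- ===== PRECONDITION & SPEC =====
-- Pre_ excludes negative inputs: A's count_digits never terminates there (Python -1 // 10 == -1).
def Pre_delete_to_maximal (number : Int) : Prop := 0 ≤ number
instance (number : Int) : Decidable (Pre_delete_to_maximal number) := by
  unfold Pre_delete_to_maximal; infer_instance

def pvWitness_delete_to_maximal : Int := (1023)

def Spec_delete_to_maximal (number : Int) (out : Int) : Prop := out = delete_to_maximal_alt number
instance (number : Int) (out : Int) : Decidable (Spec_delete_to_maximal number out) := by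
  unfold Spec_delete_to_maximal; infer_instance

-- ===== CLAIM (what is proved, stated in full; the proofs are below) =====
def Claim_equal_delete_to_maximal : Prop := ∀ (number : Int), Dom_delete_to_maximal number → Pre_delete_to_maximal number → Spec_delete_to_maximal number (delete_to_maximal number)

-- ===== LEMMAS AND PROOFS =====

-- value after deleting the digit at (0-based) position j, and the digit of n at position j
lemma ten_pow_pos (k : Nat) : (0:Int) < 10 ^ k := by positivity

lemma ediv_pow_add (n : Int) (a b : Nat) : n / 10 ^ (a + b) = n / 10 ^ a / 10 ^ b := by
  rw [pow_add]; exact Int.ediv_mul_of_nonneg (by positivity)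

lemma emod_pow_split (n : Int) (a b : Nat) :
    n % 10 ^ (a + b) = (n / 10 ^ a % 10 ^ b) * 10 ^ a + n % 10 ^ a := by
  rw [Int.emod_def, Int.emod_def, Int.emod_def, ediv_pow_add, pow_add]; ring

def dV (n : Int) (j : Nat) : Int := n / 10 ^ (j + 1) * 10 ^ j + n % 10 ^ j
def dA (n : Int) (j : Nat) : Int := n / 10 ^ j % 10

lemma dV_succ (n : Int) (m : Nat) :
    dV n (m + 1) = dV n m + (dA n m - dA n (m + 1)) * 10 ^ m := by
  have e1 := emod_pow_split n m 1
  have e2 := ediv_pow_add n (m+1) 1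
  have e3 := ediv_pow_add n m 1
  have e6 := Int.emod_def (n / 10 ^ m / 10) 10
  simp only [dV, dA, pow_one] at *
  rw [show m+1+1 = m+2 from rfl] at e2
  rw [e1, e2, e3, e6, pow_succ]
  ring

lemma dV_chain (n : Int) (i j : Nat) (hij : i ≤ j)
    (h : ∀ m, i ≤ m → m < j → dA n m ≤ dA n (m + 1)) : dV n j ≤ dV n i := by
  induction j, hij using Nat.le_induction with
  | base => exact le_refl _
  | succ j hij ih =>
    have hd := h j hij (by omega)
    have hP := ten_pow_pos j
    have hs := dV_succ n j
    have ih' := ih (fun m hm hm2 => h m hm (by omega))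
    nlinarith

lemma dV_lt (n : Int) (i j : Nat) (hij : j ≤ i)
    (h : dA n (i + 1) < dA n i) : dV n j < dV n (i + 1) := by
  obtain ⟨c, hc⟩ : ∃ c, i = j + c := ⟨i - j, by omega⟩
  subst hc
  -- upper bound on dV n j
  have e1 : n / 10 ^ (j + 1) = 10 ^ c * (n / 10 ^ (j + c + 1)) + n / 10 ^ (j + 1) % 10 ^ c := by
    have := Int.mul_ediv_add_emod (n / 10 ^ (j + 1)) (10 ^ c)
    have e := ediv_pow_add n (j+1) c
    rw [show j+1+c = j+c+1 by omega] at e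
    rw [e]; linarith [Int.mul_ediv_add_emod (n / 10 ^ (j+1)) (10 ^ c)]
  have hA0 : 0 ≤ n / 10 ^ (j + 1) % 10 ^ c := Int.emod_nonneg _ (by positivity)
  have hA1 : n / 10 ^ (j + 1) % 10 ^ c < 10 ^ c := Int.emod_lt_of_pos _ (ten_pow_pos c)
  have hB0 : 0 ≤ n % 10 ^ j := Int.emod_nonneg _ (by positivity)
  have hB1 : n % 10 ^ j < 10 ^ j := Int.emod_lt_of_pos _ (ten_pow_pos j)
  have hpow : (10:Int) ^ c * 10 ^ j = 10 ^ (j + c) := by rw [← pow_add]; ring_nf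
  have hmul : (n / 10 ^ (j+1) % 10 ^ c) * 10 ^ j ≤ (10 ^ c - 1) * 10 ^ j :=
    mul_le_mul_of_nonneg_right (by omega) (by positivity)
  have hb1 : dV n j < (n / 10 ^ (j + c + 1) + 1) * 10 ^ (j + c) := by
    have hE : dV n j = 10 ^ c * (n / 10 ^ (j + c + 1)) * 10 ^ j
        + (n / 10 ^ (j + 1) % 10 ^ c) * 10 ^ j + n % 10 ^ j := by
      rw [dV]; linear_combination (10:Int) ^ j * e1
    have t1 : (10:Int) ^ c * (n / 10 ^ (j + c + 1)) * 10 ^ j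
        = (n / 10 ^ (j + c + 1)) * 10 ^ (j + c) := by rw [← hpow]; ring
    have t2 : ((10:Int) ^ c - 1) * 10 ^ j = 10 ^ (j + c) - 10 ^ j := by rw [← hpow]; ring
    linarith
  -- lower bound on dV n (i+1), i = j + c
  have e2 : n % 10 ^ (j + c + 1) = dA n (j + c) * 10 ^ (j + c) + n % 10 ^ (j + c) := by
    have := emod_pow_split n (j + c) 1
    simpa [pow_one, dA] using this
  have e3 : n / 10 ^ (j + c + 1) = 10 * (n / 10 ^ (j + c + 2)) + dA n (j + c + 1) := by
    have h1 := Int.mul_ediv_add_emod (n / 10 ^ (j + c + 1)) 10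
    have h2 := ediv_pow_add n (j + c + 1) 1
    rw [show j+c+1+1 = j+c+2 by omega, pow_one] at h2
    rw [dA, h2]; linarith
  have hC0 : 0 ≤ n % 10 ^ (j + c) := Int.emod_nonneg _ (by positivity)
  have hb2 : (n / 10 ^ (j + c + 1) + 1) * 10 ^ (j + c) ≤ dV n (j + c + 1) := by
    have hdv : dV n (j + c + 1) = n / 10 ^ (j + c + 2) * 10 ^ (j + c + 1)
        + dA n (j + c) * 10 ^ (j + c) + n % 10 ^ (j + c) := by
      rw [dV, show j+c+1+1 = j+c+2 by omega, e2]; ring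
    have hps : (10:Int) ^ (j + c + 1) = 10 ^ (j + c) * 10 := pow_succ 10 (j + c)
    have hmono : (dA n (j + c + 1) + 1) * 10 ^ (j + c) ≤ dA n (j + c) * 10 ^ (j + c) :=
      mul_le_mul_of_nonneg_right (by omega) (by positivity)
    have t3 : n / 10 ^ (j + c + 2) * 10 ^ (j + c + 1)
        = 10 * (n / 10 ^ (j + c + 2)) * 10 ^ (j + c) := by rw [hps]; ring
    have t4 : (n / 10 ^ (j + c + 1) + 1) * 10 ^ (j + c)
        = 10 * (n / 10 ^ (j + c + 2)) * 10 ^ (j + c)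
          + (dA n (j + c + 1) + 1) * 10 ^ (j + c) := by rw [e3]; ring
    linarith
  linarith

lemma countDigitsGo_shift (n : Int) (acc : Int) :
    countDigitsGo n (acc + 1) = countDigitsGo n acc + 1 := by
  have key : ∀ N : Nat, ∀ n acc : Int, n.toNat ≤ N →
      countDigitsGo n (acc + 1) = countDigitsGo n acc + 1 := by
    intro N
    induction N with
    | zero =>
      intro n acc hN
      conv_lhs => rw [countDigitsGo]
      conv_rhs => rw [countDigitsGo]
      have : n = 0 ∨ n < 0 := by omega
      rcases this with h | h
      · rw [dif_pos h, dif_pos h]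
      · rw [dif_neg (show ¬n = 0 by omega), dif_pos h,
            dif_neg (show ¬n = 0 by omega), dif_pos h]
    | succ N ih =>
      intro n acc hN
      conv_lhs => rw [countDigitsGo]
      conv_rhs => rw [countDigitsGo]
      by_cases h : n = 0
      · rw [dif_pos h, dif_pos h]
      · by_cases h2 : n < 0
        · rw [dif_neg h, dif_pos h2, dif_neg h, dif_pos h2]
        · rw [dif_neg h, dif_neg h2, dif_neg h, dif_neg h2]
          have hf : PySem.Int.floordiv n 10 = n / 10 :=
            PySem.Int.floordiv_eq_ediv_of_pos (by norm_num)
          rw [hf]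
          exact ih (n / 10) (acc + 1) (by omega)
  exact key n.toNat n acc (le_refl _)

lemma countDigitsGo_spec (n : Int) (hn : 1 ≤ n) :
    ∃ d : Nat, 1 ≤ d ∧ countDigitsGo n 0 = (d : Int) ∧ 10 ^ (d - 1) ≤ n ∧ n < 10 ^ d := by
  have key : ∀ N : Nat, ∀ n : Int, n.toNat ≤ N → 1 ≤ n →
      ∃ d : Nat, 1 ≤ d ∧ countDigitsGo n 0 = (d : Int) ∧ 10 ^ (d - 1) ≤ n ∧ n < 10 ^ d := by
    intro N
    induction N with
    | zero => intro n hN hn; omega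
    | succ N ih =>
      intro n hN hn
      have hf : PySem.Int.floordiv n 10 = n / 10 :=
        PySem.Int.floordiv_eq_ediv_of_pos (by norm_num)
      rw [countDigitsGo, dif_neg (by omega : ¬n = 0), dif_neg (by omega : ¬n < 0), hf]
      rw [show (0:Int) + 1 = 0 + 1 from rfl, countDigitsGo_shift]
      by_cases h10 : n < 10
      · have hz : n / 10 = 0 := by omega
        rw [hz, countDigitsGo, dif_pos rfl]
        exact ⟨1, by norm_num, by norm_num, by simpa using hn, by simpa using h10⟩
      · obtain ⟨d', hd1, hdeq, hdlo, hdhi⟩ := ih (n / 10) (by omega) (by omega)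
        refine ⟨d' + 1, by omega, ?_, ?_, ?_⟩
        · rw [hdeq]; push_cast; ring
        · have hP : (10:Int) ^ d' = 10 ^ (d' - 1) * 10 := by
            rw [← pow_succ]; congr 1; omega
          have : (10:Int) ^ (d' + 1 - 1) = 10 ^ d' := by congr 1
          rw [this, hP]
          omega
        · have hQ : (10:Int) ^ (d' + 1) = 10 ^ d' * 10 := pow_succ 10 d'
          rw [hQ]
          omega
  exact key n.toNat n (le_refl _) hn

lemma altLoop_ge_best (n p best : Int) (hp : 0 < p) : best ≤ altLoop n p best hp := by
  have key : ∀ N : Nat, ∀ p best : Int, ∀ hp : 0 < p, (n + 1 - p).toNat ≤ N →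
      best ≤ altLoop n p best hp := by
    intro N
    induction N with
    | zero =>
      intro p best hp hN
      rw [altLoop, dif_neg (by omega)]
    | succ N ih =>
      intro p best hp hN
      rw [altLoop]
      by_cases h : p ≤ n
      · rw [dif_pos h]
        refine le_trans ?_ (ih (p * 10) _ (by omega) (by omega))
        split <;> omega
      · rw [dif_neg h]
  exact key (n + 1 - p).toNat p best hp (le_refl _)

lemma altLoop_p_congr (n p q b : Int) (hp : 0 < p) (hq : 0 < q) (hpq : p = q) :
    altLoop n p b hp = altLoop n q b hq := by subst hpq; rfl

lemma altLoop_ge_V (n : Int) :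
    ∀ f k j : Nat, ∀ best : Int, j - k = f → k ≤ j → (10:Int) ^ j ≤ n →
      dV n j ≤ altLoop n (10 ^ k) best (ten_pow_pos k) := by
  intro f
  induction f with
  | zero =>
    intro k j best hf hkj hj
    have hkj' : k = j := by omega
    subst hkj'
    rw [altLoop, dif_pos hj]
    have hcand : (PySem.Int.floordiv n (10 ^ k * 10)) * 10 ^ k + PySem.Int.mod n (10 ^ k)
        = dV n k := by
      rw [PySem.Int.floordiv_eq_ediv_of_pos (by positivity),
          PySem.Int.mod_eq_emod_of_pos (ten_pow_pos k), dV, ← pow_succ]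
    refine le_trans ?_ (altLoop_ge_best n _ _ (by positivity))
    rw [hcand]
    split <;> omega
  | succ f ih =>
    intro k j best hf hkj hj
    have hk : (10:Int) ^ k ≤ 10 ^ j := pow_le_pow_right₀ (by norm_num) (by omega)
    rw [altLoop, dif_pos (le_trans hk hj),
        altLoop_p_congr n _ (10 ^ (k + 1)) _ (by positivity) (ten_pow_pos (k + 1))
          (pow_succ 10 k).symm]
    exact ih (k + 1) j _ (by omega) (by omega) hj

lemma altLoop_le (n : Int) (d : Nat) (hd : n < 10 ^ d) :
    ∀ f k : Nat, ∀ best c : Int, d ≤ k + f → best ≤ c →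
      (∀ j, k ≤ j → (10:Int) ^ j ≤ n → dV n j ≤ c) →
      altLoop n (10 ^ k) best (ten_pow_pos k) ≤ c := by
  intro f
  induction f with
  | zero =>
    intro k best c hkf hbc _
    have hk : (10:Int) ^ d ≤ 10 ^ k := pow_le_pow_right₀ (by norm_num) (by omega)
    rw [altLoop, dif_neg (by omega)]
    exact hbc
  | succ f ih =>
    intro k best c hkf hbc hV
    rw [altLoop]
    by_cases h : (10:Int) ^ k ≤ n
    · rw [dif_pos h,
          altLoop_p_congr n _ (10 ^ (k + 1)) _ (by positivity) (ten_pow_pos (k + 1))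
            (pow_succ 10 k).symm]
      refine ih (k + 1) _ c (by omega) ?_ (fun j hj hj2 => hV j (by omega) hj2)
      have hcand : (PySem.Int.floordiv n (10 ^ k * 10)) * 10 ^ k + PySem.Int.mod n (10 ^ k)
          = dV n k := by
        rw [PySem.Int.floordiv_eq_ediv_of_pos (by positivity),
            PySem.Int.mod_eq_emod_of_pos (ten_pow_pos k), dV, ← pow_succ]
      have := hV k (le_refl _) h
      rw [hcand]
      split <;> omega
    · rw [dif_neg h]
      exact hbc

lemma dV_zero (n : Int) : dV n 0 = n / 10 := by simp [dV]

lemma dtm_main (n : Int) (d : Nat) (hd2 : 2 ≤ d)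
    (hlo : (10:Int) ^ (d - 1) ≤ n) (hhi : n < 10 ^ d) :
    ∀ k : Nat, 1 ≤ k → k ≤ d →
      (∀ m, k - 1 ≤ m → m ≤ d - 2 → dA n m ≤ dA n (m + 1)) →
      dtmLoop n (k : Int) = altLoop n 10 (n / 10) (by norm_num) := by
  have hn : (0:Int) ≤ n := le_trans (by positivity) hlo
  have hj_le : ∀ j : Nat, (10:Int) ^ j ≤ n → j ≤ d - 1 := by
    intro j hj
    by_contra hcon
    have : (10:Int) ^ d ≤ 10 ^ j := pow_le_pow_right₀ (by norm_num) (by omega)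
    omega
  have h10j : ∀ j : Nat, j ≤ d - 1 → (10:Int) ^ j ≤ n := fun j hj =>
    le_trans (pow_le_pow_right₀ (by norm_num) hj) hlo
  have hB10 : altLoop n 10 (n / 10) (by norm_num)
      = altLoop n (10 ^ 1) (n / 10) (ten_pow_pos 1) :=
    altLoop_p_congr n 10 (10 ^ 1) (n / 10) (by norm_num) (ten_pow_pos 1) (by norm_num)
  intro k
  induction k with
  | zero => intro h1; omega
  | succ k ih =>
    intro _ hkd hyp
    by_cases hk0 : k = 0
    · subst hk0
      rw [dtmLoop, dif_neg (by norm_num), PySem.Int.floordiv_eq_ediv_of_pos (by norm_num)]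
      refine le_antisymm (altLoop_ge_best n 10 (n / 10) (by norm_num)) ?_
      rw [hB10]
      refine altLoop_le n d hhi d 1 (n / 10) (n / 10) (by omega) (le_refl _) ?_
      intro j hj1 hjn
      rw [← dV_zero n]
      have hjd := hj_le j hjn
      exact dV_chain n 0 j (by omega) (fun m hm hm2 => hyp m (by omega) (by omega))
    · have hk1 : 1 ≤ k := by omega
      have hcd : (1:Int) < ((k+1 : Nat) : Int) := by omega
      rw [dtmLoop, dif_pos hcd]
      have ea : (((k+1 : Nat) : Int) - 1).toNat = k := by omega
      have eb : (((k+1 : Nat) : Int) - 2).toNat = k - 1 := by omega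
      have ec : (((k+1 : Nat) : Int)).toNat = k + 1 := by omega
      simp only [ea, eb, ec]
      have hm1 : PySem.Int.mod (PySem.Int.floordiv n (10 ^ k)) 10 = dA n k := by
        rw [PySem.Int.floordiv_eq_ediv_of_pos (by positivity),
            PySem.Int.mod_eq_emod_of_pos (by norm_num), dA]
      have hm2 : PySem.Int.mod (PySem.Int.floordiv n (10 ^ (k-1))) 10 = dA n (k-1) := by
        rw [PySem.Int.floordiv_eq_ediv_of_pos (by positivity),
            PySem.Int.mod_eq_emod_of_pos (by norm_num), dA]
      rw [hm1, hm2]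
      have hk1k : k - 1 + 1 = k := by omega
      by_cases hcond : dA n k < dA n (k-1)
      · rw [if_pos hcond]
        have hval : PySem.Int.floordiv n (10 ^ (k+1)) * 10 ^ k + PySem.Int.mod n (10 ^ k)
            = dV n k := by
          rw [PySem.Int.floordiv_eq_ediv_of_pos (by positivity),
              PySem.Int.mod_eq_emod_of_pos (by positivity), dV]
        rw [hval, hB10]
        have hdlt : ∀ j : Nat, j ≤ k - 1 → dV n j < dV n k := by
          intro j hj
          have := dV_lt n (k-1) j (by omega) (by rw [hk1k]; exact hcond)
          rwa [hk1k] at this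
        refine le_antisymm ?_ ?_
        · exact altLoop_ge_V n (k - 1) 1 k (n / 10) (by omega) (by omega)
            (h10j k (by omega))
        · refine altLoop_le n d hhi d 1 (n / 10) (dV n k) (by omega) ?_ ?_
          · rw [← dV_zero n]; exact le_of_lt (hdlt 0 (by omega))
          · intro j hj1 hjn
            have hjd := hj_le j hjn
            rcases lt_trichotomy j k with hlt | heq | hgt
            · exact le_of_lt (hdlt j (by omega))
            · rw [heq]
            · exact dV_chain n k j (by omega)
                (fun m hm hm2 => hyp m (by omega) (by omega))
      · rw [if_neg hcond]
        have er : ((k+1 : Nat) : Int) - 1 = (k : Int) := by omega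
        rw [er]
        refine ih hk1 (by omega) ?_
        intro m hm hm2
        rcases Nat.eq_or_lt_of_le hm with heq | hlt
        · subst heq
          rw [hk1k]
          omega
        · exact hyp m (by omega) hm2

-- ===== VERDICT (by name: the statement is the Claim_ definition above) =====
theorem delete_to_maximal_spec : Claim_equal_delete_to_maximal := by
  intro n _hdom hpre
  have hn : (0:Int) ≤ n := hpre
  unfold Spec_delete_to_maximal delete_to_maximal delete_to_maximal_alt
  by_cases h10 : n < 10
  · have hc : count_digits n = 1 := by
      by_cases h0 : n = 0
      · rw [count_digits, if_pos h0]
      · rw [count_digits, if_neg h0]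
        obtain ⟨d, hd1, hdeq, hdlo, hdhi⟩ := countDigitsGo_spec n (by omega)
        have hd1' : d = 1 := by
          by_contra hcon
          have : (10:Int) ^ 1 ≤ 10 ^ (d - 1) := pow_le_pow_right₀ (by norm_num) (by omega)
          simp at this
          omega
        rw [hdeq, hd1']
        norm_num
    rw [hc, if_pos rfl, if_pos h10]
  · obtain ⟨d, hd1, hdeq, hdlo, hdhi⟩ := countDigitsGo_spec n (by omega)
    have hd2 : 2 ≤ d := by
      by_contra hcon
      have hd1' : d = 1 := by omega
      rw [hd1'] at hdhi
      simp at hdhi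
      omega
    have hc : count_digits n = (d : Int) := by
      rw [count_digits, if_neg (by omega)]
      exact hdeq
    rw [hc, if_neg (by omega : ¬(d:Int) = 1), if_neg h10,
        PySem.Int.floordiv_eq_ediv_of_pos (by norm_num)]
    exact dtm_main n d hd2 hdlo hdhi d (by omega) (le_refl _) (fun m hm hm2 => by omega)
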